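-- pv_equiv track=rewrite | github.com/gonzacrudo28/TDA | parciales.py | plan_minimo
-- ===== SOURCE A (Python) =====
-- def plan_minimo(H, r, c):
--     n = len(H)
--     dp = [0] * (n + 3)
--     decision = [""] * n
--
--     for i in range(n - 1, -1, -1):
--         cost_arganzon = H[i] * r + dp[i + 1]
--         cost_fuddle = c + dp[i + 3]
--         if cost_arganzon <= cost_fuddle:
--             dp[i] = cost_arganzon
--             decision[i] = "A"
--         else:
--             dp[i] = cost_fuddle
--             decision[i] = "F"
--
--     elecciones = []
--     i = 0
--     while i < n:
--         if decision[i] == "A":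
--             elecciones.append(("A", i))
--             i += 1
--         else:
--             elecciones.append(("F", i))
--             i += 3
--     return dp[0], elecciones
-- ===== SOURCE B (Python) =====
-- def plan_minimo(H, r, c):
--     # Top-down memoized evaluation of solve(i) = (cost, choice chain) for the
--     # suffix starting at i, run on an explicit frame stack (phases 0/1/2) so it
--     # handles any n without hitting Python's recursion limit; cost computation
--     # and choice reconstruction are fused (chains are shared, flattened at the end).
--     n = len(H)
--     memo = {}
--     stack = [(0, 0, None)]  # frames: (i, phase, saved tail_a)
--     ret = None
--     while stack:
--         i, phase, tail_a = stack.pop()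
--         if phase == 0:
--             if i >= n:
--                 ret = (0, None)
--             elif i in memo:
--                 ret = memo[i]
--             else:
--                 stack.append((i, 1, None))
--                 stack.append((i + 1, 0, None))
--         elif phase == 1:  # ret holds solve(i+1)
--             stack.append((i, 2, ret))
--             stack.append((i + 3, 0, None))
--         else:  # phase == 2: tail_a = solve(i+1), ret holds solve(i+3)
--             tail_f = ret
--             cost_a = H[i] * r + tail_a[0]
--             cost_f = c + tail_f[0]
--             if cost_a <= cost_f:
--                 ret = (cost_a, ("A", i, tail_a[1]))
--             else:
--                 ret = (cost_f, ("F", i, tail_f[1]))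
--             memo[i] = ret
--     cost, chain = ret
--     elecciones = []
--     while chain is not None:
--         elecciones.append((chain[0], chain[1]))
--         chain = chain[2]
--     return cost, elecciones
-- ===== Notes on version B (the rewrite author's own statement) =====
-- stated objective: alternative
-- what changed: Replaces A's bottom-up backward pass over dp/decision arrays followed by a second forward reconstruction scan with a single top-down memoized recursion solve(i) that returns (cost, shared choice chain) for each suffix, fusing cost computation and choice reconstruction into one demand-driven traversal.
import Mathlib
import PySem

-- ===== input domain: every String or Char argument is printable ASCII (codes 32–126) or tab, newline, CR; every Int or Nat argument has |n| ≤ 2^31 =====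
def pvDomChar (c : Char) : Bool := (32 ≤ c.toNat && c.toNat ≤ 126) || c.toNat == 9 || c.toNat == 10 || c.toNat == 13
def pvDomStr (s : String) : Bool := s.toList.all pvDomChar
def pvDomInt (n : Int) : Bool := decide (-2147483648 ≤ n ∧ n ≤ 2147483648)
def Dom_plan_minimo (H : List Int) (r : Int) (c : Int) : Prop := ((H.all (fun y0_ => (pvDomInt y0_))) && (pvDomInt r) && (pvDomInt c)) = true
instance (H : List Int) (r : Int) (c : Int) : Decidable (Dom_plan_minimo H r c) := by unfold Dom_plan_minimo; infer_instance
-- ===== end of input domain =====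

-- B replaces A's backward dp/decision array pass plus forward reconstruction scan by a
-- top-down memoized evaluation of solve(i) = (cost, choice chain), run on an explicit
-- frame stack (objective: alternative).

-- ===== PORT A =====
-- body of 'for i in range(n-1, -1, -1)': state (dp, decision); all indexed writes
-- dp[i]=…, decision[i]=… have 0 ≤ i < len, so List.set i.toNat is exact here.
def pvAStep (H : List Int) (r : Int) (c : Int)
    (st : List Int × List String) (i : Int) : List Int × List String :=
  let dp := st.1
  let dec := st.2
  let cost_arganzon := PySem.List.pyGetD H i 0 * r + PySem.List.pyGetD dp (i + 1) 0
  let cost_fuddle := c + PySem.List.pyGetD dp (i + 3) 0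
  if cost_arganzon ≤ cost_fuddle then (dp.set i.toNat cost_arganzon, dec.set i.toNat "A")
  else (dp.set i.toNat cost_fuddle, dec.set i.toNat "F")

-- the 'while i < n' reconstruction loop; Python's i stays ≥ 0, so a Nat index is exact
def pvARecon (dec : List String) (i : Nat) : List (String × Int) :=
  if _h : i < dec.length then
    if PySem.List.pyGetD dec (i : Int) "" = "A" then ("A", (i : Int)) :: pvARecon dec (i + 1)
    else ("F", (i : Int)) :: pvARecon dec (i + 3)
  else []
termination_by dec.length - i

def plan_minimo (H : List Int) (r : Int) (c : Int) : Int × (List (String × Int)) :=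
  let n := H.length
  let init : List Int × List String := (List.replicate (n + 3) 0, List.replicate n "")
  let st := (PySem.List.pyRange ((n : Int) - 1) (-1) (-1)).foldl (pvAStep H r c) init
  (PySem.List.pyGetD st.1 0 0, pvARecon st.2 0)

-- ===== PORT B =====
-- B's nested choice tuples ("A", i, next) / None become an explicit chain type
inductive PvNode where
  | nil : PvNode
  | cons : String → Int → PvNode → PvNode
deriving DecidableEq, Repr

-- potential functions: termination measure for the frame-stack loop (cited by pvRun's decreasing_by)
def pvPot0 (n i : Nat) : Nat := if i < n then pvPot0 n (i + 1) + pvPot0 n (i + 3) + 4 else 1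
termination_by n - i

lemma pvPot0_pos (n i : Nat) : 1 ≤ pvPot0 n i := by
  rw [pvPot0]; split <;> omega

def pvPotF (n : Nat) (f : Nat × Nat × Option (Int × PvNode)) : Nat :=
  if f.2.1 = 0 then pvPot0 n f.1 else if f.2.1 = 1 then pvPot0 n (f.1 + 3) + 2 else 1

def pvM (n : Nat) (st : List (Nat × Nat × Option (Int × PvNode))) : Nat :=
  (st.map (pvPotF n)).sum

-- Source B's 'while stack' loop: frames are (i, phase, saved tail_a); memo is the dict,
-- ret the variable 'ret'.  ret/tail_a are always set when read at phase 1/2 (proved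
-- below), so the .getD defaults are unreachable.
def pvRun (H : List Int) (r : Int) (c : Int)
    (stack : List (Nat × Nat × Option (Int × PvNode)))
    (memo : PySem.Dict Nat (Int × PvNode)) (ret : Option (Int × PvNode)) :
    Option (Int × PvNode) :=
  match stack with
  | [] => ret
  | (i, phase, tail_a) :: rest =>
    if hph0 : phase = 0 then
      if hphn : H.length ≤ i then pvRun H r c rest memo (some (0, PvNode.nil))
      else
        match memo.get? i with
        | some v => pvRun H r c rest memo (some v)
        | none => pvRun H r c ((i + 1, 0, none) :: (i, 1, none) :: rest) memo ret
    else if hph1 : phase = 1 then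
      pvRun H r c ((i + 3, 0, none) :: (i, 2, ret) :: rest) memo ret
    else
      let tf := ret.getD (0, PvNode.nil)
      let ta := tail_a.getD (0, PvNode.nil)
      let cost_a := PySem.List.pyGetD H (i : Int) 0 * r + ta.1
      let cost_f := c + tf.1
      let v := if cost_a ≤ cost_f then (cost_a, PvNode.cons "A" (i : Int) ta.2)
               else (cost_f, PvNode.cons "F" (i : Int) tf.2)
      pvRun H r c rest (memo.insert i v) (some v)
termination_by pvM H.length stack
decreasing_by
  all_goals
    have hpos := pvPot0_pos H.length i
    first
      | (have he : pvPot0 H.length i = pvPot0 H.length (i + 1) + pvPot0 H.length (i + 3) + 4 := by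
           rw [pvPot0, if_pos (by omega)]
         simp_all [pvM, pvPotF]; omega)
      | (simp_all [pvM, pvPotF]; omega)
      | simp_all [pvM, pvPotF]

-- B's final 'while chain is not None' unrolling of the chain
def pvFlatten : PvNode → List (String × Int)
  | .nil => []
  | .cons s i t => (s, i) :: pvFlatten t

def plan_minimo_alt (H : List Int) (r : Int) (c : Int) : Int × (List (String × Int)) :=
  let res := (pvRun H r c [(0, 0, none)] PySem.Dict.empty none).getD (0, PvNode.nil)
  (res.1, pvFlatten res.2)

-- ===== PRECONDITION & SPEC =====
def Spec_plan_minimo (H : List Int) (r : Int) (c : Int) (out : Int × (List (String × Int))) : Prop := out = plan_minimo_alt H r c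
instance (H : List Int) (r : Int) (c : Int) (out : Int × (List (String × Int))) : Decidable (Spec_plan_minimo H r c out) := by unfold Spec_plan_minimo; infer_instance

-- ===== CLAIM (what is proved, stated in full; the proofs are below) =====
def Claim_equal_plan_minimo : Prop := ∀ (H : List Int) (r : Int) (c : Int), Dom_plan_minimo H r c → Spec_plan_minimo H r c (plan_minimo H r c)

-- ===== LEMMAS AND PROOFS =====

-- Reference recursion: the optimal (cost, choices) from index i on.
def pvS (H : List Int) (r : Int) (c : Int) (i : Nat) : Int × List (String × Int) :=
  if _h : i < H.length then
    let a := pvS H r c (i + 1)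
    let f := pvS H r c (i + 3)
    let ca := H.getD i 0 * r + a.1
    let cf := c + f.1
    if ca ≤ cf then (ca, ("A", (i : Int)) :: a.2) else (cf, ("F", (i : Int)) :: f.2)
  else (0, [])
termination_by H.length - i

lemma pvS_stop (H : List Int) (r c : Int) (i : Nat) (h : ¬ i < H.length) :
    pvS H r c i = (0, []) := by rw [pvS]; simp [h]

-- generic countdown-fold invariant lemma for foldl over range(k-1, -1, -1)
lemma pvFoldDown {α : Type} (n : Nat) (f : α → Int → α) (P : Nat → α → Prop)
    (hstep : ∀ (j : Nat) (st : α), j < n → P (j + 1) st → P j (f st (j : Int))) :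
    ∀ (k : Nat), k ≤ n → ∀ (st : α), P k st →
      P 0 ((PySem.List.pyRange ((k : Int) - 1) (-1) (-1)).foldl f st) := by
  intro k
  induction k with
  | zero => intro _ st h; rw [PySem.List.pyRange_neg_one_eq_nil (by norm_num)]; simpa
  | succ k ih =>
      intro hk st h
      have hc : (-1 : Int) < ((k + 1 : Nat) : Int) - 1 := by push_cast; omega
      rw [PySem.List.pyRange_neg_one_cons hc]
      have h2 : (((k + 1 : Nat) : Int) - 1) = (k : Int) := by push_cast; ring
      rw [h2]
      simp only [List.foldl_cons]
      exact ih (by omega) (f st (k : Int)) (hstep k st (by omega) h)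

-- getD after set
lemma pvGetDSet {α : Type} (xs : List α) (j i : Nat) (v d : α) (hj : j < xs.length) :
    (xs.set j v).getD i d = if i = j then v else xs.getD i d := by
  by_cases h : i = j
  · subst h; simp [List.getD_eq_getElem?_getD, List.getElem?_set_self (by omega)]
  · rw [if_neg h]
    simp [List.getD_eq_getElem?_getD, List.getElem?_set_ne (show j ≠ i from fun e => h e.symm)]

-- the letter A's decision array records at i
def pvLetter (H : List Int) (r : Int) (c : Int) (i : Nat) : String :=
  if H.getD i 0 * r + (pvS H r c (i + 1)).1 ≤ c + (pvS H r c (i + 3)).1 then "A" else "F"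

-- invariant of A's backward loop
def pvInvA (H : List Int) (r : Int) (c : Int) (j : Nat) (st : List Int × List String) : Prop :=
  st.1.length = H.length + 3 ∧ st.2.length = H.length ∧
  (∀ i : Nat, st.1.getD i 0 = if j ≤ i then (pvS H r c i).1 else 0) ∧
  (∀ i : Nat, i < H.length → st.2.getD i "" = if j ≤ i then pvLetter H r c i else "")

lemma pvStepA (H : List Int) (r c : Int) (j : Nat) (hj : j < H.length)
    (st : List Int × List String)
    (h : pvInvA H r c (j + 1) st) : pvInvA H r c j (pvAStep H r c st (j : Int)) := by
  obtain ⟨hdp, hdec, hvals, hlets⟩ := h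
  have hH : PySem.List.pyGetD H (j : Int) 0 = H.getD j 0 := PySem.List.pyGetD_natCast ..
  have h1 : PySem.List.pyGetD st.1 ((j : Int) + 1) 0 = (pvS H r c (j + 1)).1 := by
    have e : ((j : Int) + 1) = ((j + 1 : Nat) : Int) := by push_cast; ring
    rw [e, PySem.List.pyGetD_natCast, hvals]; simp
  have h3 : PySem.List.pyGetD st.1 ((j : Int) + 3) 0 = (pvS H r c (j + 3)).1 := by
    have e : ((j : Int) + 3) = ((j + 3 : Nat) : Int) := by push_cast; ring
    rw [e, PySem.List.pyGetD_natCast, hvals]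
    simp [show j + 1 ≤ j + 3 by omega]
  have hSj : pvS H r c j =
      if H.getD j 0 * r + (pvS H r c (j + 1)).1 ≤ c + (pvS H r c (j + 3)).1 then
        (H.getD j 0 * r + (pvS H r c (j + 1)).1, ("A", (j : Int)) :: (pvS H r c (j + 1)).2)
      else (c + (pvS H r c (j + 3)).1, ("F", (j : Int)) :: (pvS H r c (j + 3)).2) := by
    rw [pvS]; simp [hj]
  have htn : (j : Int).toNat = j := Int.toNat_natCast j
  have main : ∀ (v : Int) (s : String),
      v = (pvS H r c j).1 → s = pvLetter H r c j →
      pvInvA H r c j (st.1.set j v, st.2.set j s) := by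
    intro v s hv hs
    refine ⟨by simp [hdp], by simp [hdec], ?_, ?_⟩
    · intro i
      rw [pvGetDSet _ _ _ _ _ (by omega)]
      by_cases hij : i = j
      · subst hij; simp [hv]
      · rw [hvals i]
        by_cases hji : j ≤ i
        · have e : j + 1 ≤ i := by omega
          simp [hij, hji, e]
        · simp [hij, hji, show ¬ j + 1 ≤ i by omega]
    · intro i hi
      rw [pvGetDSet _ _ _ _ _ (by omega)]
      by_cases hij : i = j
      · subst hij; simp [hs]
      · rw [hlets i hi]
        by_cases hji : j ≤ i
        · have e : j + 1 ≤ i := by omega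
          simp [hij, hji, e]
        · simp [hij, hji, show ¬ j + 1 ≤ i by omega]
  unfold pvAStep
  simp only [hH, h1, h3, htn]
  by_cases hle : H.getD j 0 * r + (pvS H r c (j + 1)).1 ≤ c + (pvS H r c (j + 3)).1
  · rw [if_pos hle]
    exact main _ _ (by rw [hSj, if_pos hle]) (by unfold pvLetter; rw [if_pos hle])
  · rw [if_neg hle]
    exact main _ _ (by rw [hSj, if_neg hle]) (by unfold pvLetter; rw [if_neg hle])

-- initial states satisfy the invariant at j = n
lemma pvInitA (H : List Int) (r c : Int) :
    pvInvA H r c H.length (List.replicate (H.length + 3) 0, List.replicate H.length "") := by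
  have hrep : ∀ i : Nat, (List.replicate (H.length + 3) (0 : Int)).getD i 0 = 0 := by
    intro i
    simp only [List.getD_eq_getElem?_getD, List.getElem?_replicate]
    split <;> rfl
  have hrep2 : ∀ i : Nat, (List.replicate H.length "").getD i "" = "" := by
    intro i
    simp only [List.getD_eq_getElem?_getD, List.getElem?_replicate]
    split <;> rfl
  refine ⟨by simp, by simp, ?_, ?_⟩
  · intro i
    rw [hrep i]
    by_cases hi : H.length ≤ i
    · rw [if_pos hi, pvS_stop H r c i (by omega)]
    · rw [if_neg hi]
  · intro i hi
    rw [hrep2 i, if_neg (by omega)]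

-- A's forward while-loop reproduces the choices of pvS
lemma pvReconEq (H : List Int) (r c : Int) (dec : List String)
    (hlen : dec.length = H.length)
    (hdec : ∀ i : Nat, i < H.length → dec.getD i "" = pvLetter H r c i)
    (i : Nat) : pvARecon dec i = (pvS H r c i).2 := by
  rw [pvARecon]
  by_cases hi : i < dec.length
  · have hin : i < H.length := by omega
    have hg : PySem.List.pyGetD dec (i : Int) "" = pvLetter H r c i := by
      rw [PySem.List.pyGetD_natCast]; exact hdec i hin
    rw [dif_pos hi, hg]
    have hS : pvS H r c i =
        if H.getD i 0 * r + (pvS H r c (i + 1)).1 ≤ c + (pvS H r c (i + 3)).1 then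
          (H.getD i 0 * r + (pvS H r c (i + 1)).1, ("A", (i : Int)) :: (pvS H r c (i + 1)).2)
        else (c + (pvS H r c (i + 3)).1, ("F", (i : Int)) :: (pvS H r c (i + 3)).2) := by
      rw [pvS]; simp [hin]
    by_cases hle : H.getD i 0 * r + (pvS H r c (i + 1)).1 ≤ c + (pvS H r c (i + 3)).1
    · rw [if_pos (show pvLetter H r c i = "A" by unfold pvLetter; rw [if_pos hle])]
      rw [pvReconEq H r c dec hlen hdec (i + 1)]
      rw [hS, if_pos hle]
    · rw [if_neg (show ¬ pvLetter H r c i = "A" by unfold pvLetter; rw [if_neg hle]; decide)]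
      rw [pvReconEq H r c dec hlen hdec (i + 3)]
      rw [hS, if_neg hle]
  · rw [dif_neg hi, pvS_stop H r c i (by omega)]
termination_by dec.length - i

lemma pvA_eq_S (H : List Int) (r c : Int) : plan_minimo H r c = pvS H r c 0 := by
  set st := (PySem.List.pyRange ((H.length : Int) - 1) (-1) (-1)).foldl (pvAStep H r c)
    (List.replicate (H.length + 3) 0, List.replicate H.length "") with hst
  have hfold : pvInvA H r c 0 st := by
    rw [hst]
    exact pvFoldDown H.length (pvAStep H r c) (pvInvA H r c)
      (fun j st hj h => pvStepA H r c j hj st h) H.length (le_refl _)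
      (List.replicate (H.length + 3) 0, List.replicate H.length "") (pvInitA H r c)
  obtain ⟨hdp, hdec, hvals, hlets⟩ := hfold
  have h1 : PySem.List.pyGetD st.1 0 0 = (pvS H r c 0).1 := by
    rw [show (0 : Int) = ((0 : Nat) : Int) by simp, PySem.List.pyGetD_natCast]
    simpa using hvals 0
  have h2 : pvARecon st.2 0 = (pvS H r c 0).2 :=
    pvReconEq H r c st.2 hdec (fun i hi => by simpa using hlets i hi) 0
  have e : plan_minimo H r c = (PySem.List.pyGetD st.1 0 0, pvARecon st.2 0) := rfl
  rw [e, h1, h2]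

-- reference recursion: what Source B's solve(i) denotes
def pvRef (H : List Int) (r : Int) (c : Int) (i : Nat) : Int × PvNode :=
  if _h : i < H.length then
    let tail_a := pvRef H r c (i + 1)
    let tail_f := pvRef H r c (i + 3)
    let cost_a := PySem.List.pyGetD H (i : Int) 0 * r + tail_a.1
    let cost_f := c + tail_f.1
    if cost_a ≤ cost_f then (cost_a, PvNode.cons "A" (i : Int) tail_a.2)
    else (cost_f, PvNode.cons "F" (i : Int) tail_f.2)
  else (0, PvNode.nil)
termination_by H.length - i

-- a memo that only stores correct values
def pvGood (H : List Int) (r : Int) (c : Int) (memo : PySem.Dict Nat (Int × PvNode)) : Prop :=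
  ∀ (i : Nat) (v : Int × PvNode), memo.get? i = some v → v = pvRef H r c i

-- one-step equations of the machine
lemma pvRunBase (H : List Int) (r c : Int) (i : Nat) (ta : Option (Int × PvNode))
    (st : List (Nat × Nat × Option (Int × PvNode))) (memo : PySem.Dict Nat (Int × PvNode))
    (ret : Option (Int × PvNode)) (hn : H.length ≤ i) :
    pvRun H r c ((i, 0, ta) :: st) memo ret = pvRun H r c st memo (some (0, PvNode.nil)) := by
  rw [pvRun]; simp [hn]

lemma pvRunHit (H : List Int) (r c : Int) (i : Nat) (ta : Option (Int × PvNode))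
    (st : List (Nat × Nat × Option (Int × PvNode))) (memo : PySem.Dict Nat (Int × PvNode))
    (ret : Option (Int × PvNode)) (v : Int × PvNode)
    (hn : ¬ H.length ≤ i) (hv : memo.get? i = some v) :
    pvRun H r c ((i, 0, ta) :: st) memo ret = pvRun H r c st memo (some v) := by
  rw [pvRun]; simp [hn, hv]

lemma pvRunMiss (H : List Int) (r c : Int) (i : Nat) (ta : Option (Int × PvNode))
    (st : List (Nat × Nat × Option (Int × PvNode))) (memo : PySem.Dict Nat (Int × PvNode))
    (ret : Option (Int × PvNode))
    (hn : ¬ H.length ≤ i) (hv : memo.get? i = none) :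
    pvRun H r c ((i, 0, ta) :: st) memo ret =
      pvRun H r c ((i + 1, 0, none) :: (i, 1, none) :: st) memo ret := by
  rw [pvRun]; simp [hn, hv]

lemma pvRunStep1 (H : List Int) (r c : Int) (i : Nat) (ta : Option (Int × PvNode))
    (st : List (Nat × Nat × Option (Int × PvNode))) (memo : PySem.Dict Nat (Int × PvNode))
    (ret : Option (Int × PvNode)) :
    pvRun H r c ((i, 1, ta) :: st) memo ret =
      pvRun H r c ((i + 3, 0, none) :: (i, 2, ret) :: st) memo ret := by
  rw [pvRun]; norm_num

lemma pvRunStep2 (H : List Int) (r c : Int) (i : Nat) (a f : Int × PvNode)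
    (st : List (Nat × Nat × Option (Int × PvNode))) (memo : PySem.Dict Nat (Int × PvNode)) :
    pvRun H r c ((i, 2, some a) :: st) memo (some f) =
      (let v := if PySem.List.pyGetD H (i : Int) 0 * r + a.1 ≤ c + f.1 then
          (PySem.List.pyGetD H (i : Int) 0 * r + a.1, PvNode.cons "A" (i : Int) a.2)
        else (c + f.1, PvNode.cons "F" (i : Int) f.2)
       pvRun H r c st (memo.insert i v) (some v)) := by
  rw [pvRun]; norm_num

-- running a phase-0 frame delivers pvRef i and a still-good memo
lemma pvRunSpec (H : List Int) (r c : Int) (i : Nat) :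
    ∀ (st : List (Nat × Nat × Option (Int × PvNode)))
      (memo : PySem.Dict Nat (Int × PvNode)) (ret : Option (Int × PvNode)),
      pvGood H r c memo →
      ∃ memo', pvGood H r c memo' ∧
        pvRun H r c ((i, 0, none) :: st) memo ret = pvRun H r c st memo' (some (pvRef H r c i)) := by
  intro st memo ret hg
  by_cases hn : H.length ≤ i
  · refine ⟨memo, hg, ?_⟩
    rw [pvRunBase H r c i none st memo ret hn]
    have : pvRef H r c i = (0, PvNode.nil) := by rw [pvRef]; simp [show ¬ i < H.length by omega]
    rw [this]
  · rcases hmv : memo.get? i with _ | v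
    · -- memo miss: expand
      rw [pvRunMiss H r c i none st memo ret hn hmv]
      obtain ⟨m1, hg1, he1⟩ := pvRunSpec H r c (i + 1) ((i, 1, none) :: st) memo ret hg
      rw [he1, pvRunStep1]
      obtain ⟨m2, hg2, he3⟩ := pvRunSpec H r c (i + 3)
        ((i, 2, some (pvRef H r c (i + 1))) :: st) m1 (some (pvRef H r c (i + 1))) hg1
      rw [he3, pvRunStep2]
      have hi : i < H.length := by omega
      have hRef : pvRef H r c i =
          if PySem.List.pyGetD H (i : Int) 0 * r + (pvRef H r c (i + 1)).1 ≤
              c + (pvRef H r c (i + 3)).1 then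
            (PySem.List.pyGetD H (i : Int) 0 * r + (pvRef H r c (i + 1)).1,
              PvNode.cons "A" (i : Int) (pvRef H r c (i + 1)).2)
          else (c + (pvRef H r c (i + 3)).1, PvNode.cons "F" (i : Int) (pvRef H r c (i + 3)).2) := by
        rw [pvRef]; simp [hi]
      refine ⟨m2.insert i (pvRef H r c i), ?_, ?_⟩
      · intro j v hjv
        rw [PySem.Dict.get?_insert] at hjv
        split at hjv
        · next hji => cases hjv; subst hji; rfl
        · exact hg2 j v hjv
      · simp only []
        rw [← hRef]
    · -- memo hit
      refine ⟨memo, hg, ?_⟩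
      rw [pvRunHit H r c i none st memo ret v hn hmv, hg i v hmv]
termination_by H.length - i
decreasing_by
  · omega
  · omega

-- the reference recursion computes pvS's cost, and its chain flattens to pvS's choices
lemma pvRef_eq_S (H : List Int) (r c : Int) (i : Nat) :
    (pvRef H r c i).1 = (pvS H r c i).1 ∧
    pvFlatten (pvRef H r c i).2 = (pvS H r c i).2 := by
  rw [pvRef, pvS]
  by_cases hi : i < H.length
  · have ha := pvRef_eq_S H r c (i + 1)
    have hf := pvRef_eq_S H r c (i + 3)
    have hH : PySem.List.pyGetD H (i : Int) 0 = H.getD i 0 := PySem.List.pyGetD_natCast ..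
    simp only [dif_pos hi, hH, ha.1, hf.1]
    by_cases hle : H.getD i 0 * r + (pvS H r c (i + 1)).1 ≤ c + (pvS H r c (i + 3)).1
    · simp only [if_pos hle]; exact ⟨trivial, by simp [pvFlatten, ha.2]⟩
    · simp only [if_neg hle]; exact ⟨trivial, by simp [pvFlatten, hf.2]⟩
  · simp [dif_neg hi, pvFlatten]
termination_by H.length - i

lemma pvB_eq_S (H : List Int) (r c : Int) : plan_minimo_alt H r c = pvS H r c 0 := by
  obtain ⟨m, _, he⟩ := pvRunSpec H r c 0 [] PySem.Dict.empty none
    (fun i v h => by rw [PySem.Dict.get?_empty] at h; cases h)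
  have hrun : pvRun H r c [(0, 0, none)] PySem.Dict.empty none = some (pvRef H r c 0) := by
    rw [he, pvRun]
  have h := pvRef_eq_S H r c 0
  have e : plan_minimo_alt H r c =
      (((pvRun H r c [(0, 0, none)] PySem.Dict.empty none).getD (0, PvNode.nil)).1,
       pvFlatten ((pvRun H r c [(0, 0, none)] PySem.Dict.empty none).getD (0, PvNode.nil)).2) := rfl
  rw [e, hrun]
  simp only [Option.getD_some]
  rw [h.1, h.2]

-- ===== VERDICT (by name: the statement is the Claim_ definition above) =====
theorem plan_minimo_spec : Claim_equal_plan_minimo := by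
  intro H r c _
  unfold Spec_plan_minimo
  rw [pvA_eq_S, pvB_eq_S]
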